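-- pv_equiv track=rewrite | github.com/uiandwe/TIL | algorithm/hash/hash_lookup_table_search.py | solution
-- ===== SOURCE A (Python) =====
-- def solution(arr, searchWord):
--     dict = {}
--     for index, word in enumerate(arr):
--         hash_key = get_key(word.lower())
--         if hash_key in dict:
--             dict[hash_key].append(index)
--         else:
--             dict[hash_key] = [index]
--
--     word_key = get_key(searchWord)
--     for index in dict[word_key]:
--         if arr[index] == searchWord:
--             return index
--
--     return -1
--
-- def get_key(str):
--     key = 0
--     p = 1
--     pn = 23
--     hashSize = 5
--     for c in str:
--         key += ord(c) * p
--         p *= pn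
--     return key % hashSize
-- ===== SOURCE B (Python) =====
-- def solution(arr, searchWord):
--     first_match = {}
--     for index, word in enumerate(arr):
--         key = get_key(word.lower())
--         if key not in first_match:
--             first_match[key] = index if word == searchWord else -1
--         elif first_match[key] == -1 and word == searchWord:
--             first_match[key] = index
--     return first_match[get_key(searchWord)]
--
-- def get_key(str):
--     key = 0
--     p = 1
--     pn = 23
--     hashSize = 5
--     for c in str:
--         key += ord(c) * p
--         p *= pn
--     return key % hashSize
-- ===== Notes on version B (the rewrite author's own statement) =====
-- stated objective: alternative
-- what changed: Replaces A's two phases (build hash buckets of index lists, then rescan the searched bucket against arr) by a single pass that folds the query into the build: a dict mapping each hash key directly to the first index in that bucket whose word equals searchWord (else -1), finished by one dict lookup.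
import Mathlib
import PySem

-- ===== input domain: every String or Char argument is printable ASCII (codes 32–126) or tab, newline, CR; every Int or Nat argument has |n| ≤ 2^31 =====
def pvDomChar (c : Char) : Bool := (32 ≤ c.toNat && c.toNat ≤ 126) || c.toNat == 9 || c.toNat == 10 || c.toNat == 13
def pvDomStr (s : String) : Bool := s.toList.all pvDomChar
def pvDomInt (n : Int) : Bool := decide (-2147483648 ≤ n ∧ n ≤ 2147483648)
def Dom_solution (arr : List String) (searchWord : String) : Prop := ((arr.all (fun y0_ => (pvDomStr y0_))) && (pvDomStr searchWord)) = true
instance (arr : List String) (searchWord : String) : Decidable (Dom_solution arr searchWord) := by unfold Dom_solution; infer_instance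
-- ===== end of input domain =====

-- B folds the query into a single pass: instead of A's bucket dict of index
-- lists plus a rescan of the searched bucket, B maps each hash key directly to
-- the first index in that bucket whose word equals searchWord (else -1) and
-- finishes with one dict lookup.

-- get_key, the helper both Python files define identically (key = Σ ord(c)·23^i mod 5)
def getKey (s : String) : Int :=
  let st := s.toList.foldl (fun (kp : Int × Int) c => (kp.1 + (c.toNat : Int) * kp.2, kp.2 * 23)) (0, 1)
  PySem.Int.mod st.1 5

-- ===== PORT A =====
-- second loop of A: for index in bucket: if arr[index] == searchWord: return index; then -1
def loopA (arr : List String) (searchWord : String) : List Int → Int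
  | [] => -1
  | i :: rest =>
    if PySem.List.pyGet? arr i = some searchWord then i else loopA arr searchWord rest

def solution (arr : List String) (searchWord : String) : Int :=
  let d := (PySem.List.enumerate arr 0).foldl
    (fun (d : PySem.Dict Int (List Int)) p =>
      let hk := getKey (PySem.Str.lower p.2)
      if d.contains hk then d.modify hk [] (· ++ [p.1]) else d.insert hk [p.1])
    PySem.Dict.empty
  let wordKey := getKey searchWord
  -- Python raises KeyError when wordKey is absent (excluded by Pre_); getD then yields []
  loopA arr searchWord (d.getD wordKey [])

-- ===== PORT B =====
-- B's loop body: first_match[key] kept at the first exact-match index of the bucket, else -1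
def stepB (searchWord : String) (d : PySem.Dict Int Int) (p : Int × String) : PySem.Dict Int Int :=
  let k := getKey (PySem.Str.lower p.2)
  if d.contains k then
    -- elif first_match[key] == -1 and word == searchWord: first_match[key] = index
    if d.get? k = some (-1) ∧ p.2 = searchWord then d.insert k p.1 else d
  else d.insert k (if p.2 = searchWord then p.1 else -1)

def solution_alt (arr : List String) (searchWord : String) : Int :=
  let fm := (PySem.List.enumerate arr 0).foldl (stepB searchWord) PySem.Dict.empty
  -- Python raises KeyError when the key is absent (excluded by Pre_)
  fm.getD (getKey searchWord) (-1)

-- ===== PRECONDITION & SPEC =====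
-- Pre_ excludes exactly the inputs on which no word's lower-cased hash key equals
-- searchWord's key: there both A and B raise KeyError from their final dict lookup.
def Pre_solution (arr : List String) (searchWord : String) : Prop :=
  ∃ w ∈ arr, getKey (PySem.Str.lower w) = getKey searchWord
instance (arr : List String) (searchWord : String) : Decidable (Pre_solution arr searchWord) := by
  unfold Pre_solution; infer_instance

def pvWitness_solution : List String × String := (["a"], "a")

def Spec_solution (arr : List String) (searchWord : String) (out : Int) : Prop := out = solution_alt arr searchWord
instance (arr : List String) (searchWord : String) (out : Int) : Decidable (Spec_solution arr searchWord out) := by unfold Spec_solution; infer_instance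

-- ===== CLAIM (what is proved, stated in full; the proofs are below) =====
def Claim_equal_solution : Prop := ∀ (arr : List String) (searchWord : String), Dom_solution arr searchWord → Pre_solution arr searchWord → Spec_solution arr searchWord (solution arr searchWord)

-- ===== LEMMAS AND PROOFS =====

-- the reference scan: first index among the pairs whose key is wk and word is sw, else -1
def scanF (wk : Int) (sw : String) : List (Int × String) → Int
  | [] => -1
  | p :: rest =>
    if getKey (PySem.Str.lower p.2) = wk ∧ p.2 = sw then p.1 else scanF wk sw rest

-- B's fold restricted to the single key wk, as a pure function of that key's entry
def gOpt (wk : Int) (sw : String) : Option Int → List (Int × String) → Option Int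
  | o, [] => o
  | none, p :: rest =>
    if getKey (PySem.Str.lower p.2) = wk then
      gOpt wk sw (some (if p.2 = sw then p.1 else -1)) rest
    else gOpt wk sw none rest
  | some v, p :: rest =>
    if getKey (PySem.Str.lower p.2) = wk then
      gOpt wk sw (if v = -1 ∧ p.2 = sw then some p.1 else some v) rest
    else gOpt wk sw (some v) rest

-- A's bucket for a key = the indices whose word hashes to that key, in order
theorem bucket_eq (wk : Int) (l : List (Int × String)) (d : PySem.Dict Int (List Int)) :
    (l.foldl
      (fun (d : PySem.Dict Int (List Int)) p =>
        let hk := getKey (PySem.Str.lower p.2)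
        if d.contains hk then d.modify hk [] (· ++ [p.1]) else d.insert hk [p.1])
      d).getD wk []
    = d.getD wk [] ++ (l.filter (fun p => getKey (PySem.Str.lower p.2) = wk)).map (·.1) := by
  induction l generalizing d with
  | nil => simp
  | cons p rest ih =>
    simp only [List.foldl_cons, List.filter_cons]
    by_cases hk : getKey (PySem.Str.lower p.2) = wk
    · subst hk
      by_cases hc : d.contains (getKey (PySem.Str.lower p.2))
      · rw [if_pos hc, ih, PySem.Dict.getD_modify, if_pos rfl]
        simp [List.append_assoc]
      · rw [if_neg hc, ih, PySem.Dict.getD_insert, if_pos rfl,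
          PySem.Dict.getD_of_not_contains _ _ (by simpa using hc)]
        simp
    · have hne : wk ≠ getKey (PySem.Str.lower p.2) := fun h => hk h.symm
      simp only [hk, decide_false, Bool.false_eq_true, if_false]
      by_cases hc : d.contains (getKey (PySem.Str.lower p.2))
      · rw [if_pos hc, ih, PySem.Dict.getD_modify, if_neg hne]
      · rw [if_neg hc, ih, PySem.Dict.getD_insert, if_neg hne]

-- A's scan of its bucket equals the reference scan over the raw pairs
theorem loopA_filter_eq_scanF (arr : List String) (sw : String) (wk : Int)
    (l : List (Int × String)) (h : ∀ p ∈ l, PySem.List.pyGet? arr p.1 = some p.2) :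
    loopA arr sw ((l.filter (fun p => getKey (PySem.Str.lower p.2) = wk)).map (·.1))
      = scanF wk sw l := by
  induction l with
  | nil => simp [loopA, scanF]
  | cons p rest ih =>
    have hp : PySem.List.pyGet? arr p.1 = some p.2 := h p (List.mem_cons_self ..)
    have hrest : ∀ q ∈ rest, PySem.List.pyGet? arr q.1 = some q.2 :=
      fun q hq => h q (List.mem_cons_of_mem _ hq)
    simp only [List.filter_cons, scanF]
    by_cases hk : getKey (PySem.Str.lower p.2) = wk
    · simp only [hk, decide_true, if_true, List.map_cons, loopA, hp]
      by_cases hsw : p.2 = sw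
      · simp [hsw]
      · rw [if_neg (by simpa using hsw), if_neg (fun h => hsw h.2)]
        exact ih hrest
    · rw [if_neg (by simp [hk]), if_neg (fun h => hk h.1)]
      exact ih hrest

-- B's fold, observed at key wk, is gOpt
theorem foldB_get? (sw : String) (wk : Int) (l : List (Int × String))
    (d : PySem.Dict Int Int) :
    ((l.foldl (stepB sw) d).get? wk) = gOpt wk sw (d.get? wk) l := by
  induction l generalizing d with
  | nil => simp [gOpt]
  | cons p rest ih =>
    rw [List.foldl_cons, ih]
    have hstep : (stepB sw d p).get? wk
        = (if getKey (PySem.Str.lower p.2) = wk then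
            (match d.get? wk with
              | none => some (if p.2 = sw then p.1 else -1)
              | some v => if v = -1 ∧ p.2 = sw then some p.1 else some v)
          else d.get? wk) := by
      unfold stepB
      by_cases hk : getKey (PySem.Str.lower p.2) = wk
      · subst hk
        rw [if_pos rfl]
        by_cases hc : d.contains (getKey (PySem.Str.lower p.2))
        · have hvs : (d.get? (getKey (PySem.Str.lower p.2))).isSome := by
            rw [← PySem.Dict.contains_eq_isSome_get?]; exact hc
          rcases Option.isSome_iff_exists.1 hvs with ⟨v, hv⟩
          rw [if_pos hc]
          by_cases hcond : d.get? (getKey (PySem.Str.lower p.2)) = some (-1) ∧ p.2 = sw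
          · have hv1 : v = -1 := by
              have := hcond.1; rw [hv] at this; exact Option.some.inj this
            rw [if_pos hcond, PySem.Dict.get?_insert_self, hv]
            simp [hv1, hcond.2]
          · have hnc : ¬ (v = -1 ∧ p.2 = sw) := fun h => hcond ⟨by rw [hv, h.1], h.2⟩
            rw [if_neg hcond, hv]
            simp [hnc]
        · rw [if_neg hc, PySem.Dict.get?_insert_self,
            (PySem.Dict.get?_eq_none_iff_contains _ _).2 (by simpa using hc)]
      · rw [if_neg hk]
        have hne : wk ≠ getKey (PySem.Str.lower p.2) := fun h => hk h.symm
        by_cases hc : d.contains (getKey (PySem.Str.lower p.2))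
        · rw [if_pos hc]
          split_ifs with hcond
          · exact PySem.Dict.get?_insert_of_ne _ _ hne
          · rfl
        · rw [if_neg hc]
          exact PySem.Dict.get?_insert_of_ne _ _ hne
    rw [hstep]
    by_cases hk : getKey (PySem.Str.lower p.2) = wk
    · rw [if_pos hk]
      cases hdg : d.get? wk with
      | none => simp [gOpt, hk]
      | some v =>
        by_cases hcond : v = -1 ∧ p.2 = sw
        · have hk' : getKey (PySem.Str.lower sw) = wk := by rw [← hcond.2]; exact hk
          simp [gOpt, hk', hcond]
        · simp [gOpt, hk, hcond]
    · rw [if_neg hk]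
      cases hdg : d.get? wk with
      | none => simp [gOpt, hk]
      | some v => simp [gOpt, hk]

-- once a real index is stored for wk it never changes
theorem gOpt_some_ne (wk : Int) (sw : String) (v : Int) (hv : v ≠ -1)
    (l : List (Int × String)) : gOpt wk sw (some v) l = some v := by
  induction l with
  | nil => rfl
  | cons p rest ih =>
    simp only [gOpt]
    split_ifs with hk hcond
    · exact absurd hcond.1 hv
    · exact ih
    · exact ih

-- from the sentinel -1, gOpt finds exactly the reference scan's answer
theorem gOpt_neg_one (wk : Int) (sw : String) (l : List (Int × String))
    (hnn : ∀ p ∈ l, 0 ≤ p.1) : gOpt wk sw (some (-1)) l = some (scanF wk sw l) := by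
  induction l with
  | nil => rfl
  | cons p rest ih =>
    have hp : (0 : Int) ≤ p.1 := hnn p (List.mem_cons_self ..)
    have hrest : ∀ q ∈ rest, (0 : Int) ≤ q.1 := fun q hq => hnn q (List.mem_cons_of_mem _ hq)
    by_cases hk : getKey (PySem.Str.lower p.2) = wk
    · by_cases hsw : p.2 = sw
      · have hk' : getKey (PySem.Str.lower sw) = wk := by rw [← hsw]; exact hk
        simp [gOpt, scanF, hk', hsw, gOpt_some_ne wk sw p.1 (by omega) rest]
      · simp [gOpt, scanF, hk, hsw, ih hrest]
    · simp [gOpt, scanF, hk, ih hrest]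

-- if some pair carries key wk, gOpt from an empty entry also returns the scan's answer
theorem gOpt_none (wk : Int) (sw : String) (l : List (Int × String))
    (hnn : ∀ p ∈ l, 0 ≤ p.1)
    (hex : ∃ p ∈ l, getKey (PySem.Str.lower p.2) = wk) :
    gOpt wk sw none l = some (scanF wk sw l) := by
  induction l with
  | nil => rcases hex with ⟨p, hp, _⟩; cases hp
  | cons p rest ih =>
    have hp : (0 : Int) ≤ p.1 := hnn p (List.mem_cons_self ..)
    have hrest : ∀ q ∈ rest, (0 : Int) ≤ q.1 := fun q hq => hnn q (List.mem_cons_of_mem _ hq)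
    by_cases hk : getKey (PySem.Str.lower p.2) = wk
    · by_cases hsw : p.2 = sw
      · have hk' : getKey (PySem.Str.lower sw) = wk := by rw [← hsw]; exact hk
        simp [gOpt, scanF, hk', hsw, gOpt_some_ne wk sw p.1 (by omega) rest]
      · simp [gOpt, scanF, hk, hsw, gOpt_neg_one wk sw rest hrest]
    · have hex' : ∃ q ∈ rest, getKey (PySem.Str.lower q.2) = wk := by
        rcases hex with ⟨q, hq, hqk⟩
        rcases List.mem_cons.1 hq with rfl | hq'
        · exact absurd hqk hk
        · exact ⟨q, hq', hqk⟩
      simp [gOpt, scanF, hk, ih hrest hex']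

theorem mem_enum_get (arr : List String) :
    ∀ p ∈ PySem.List.enumerate arr 0, PySem.List.pyGet? arr p.1 = some p.2 := by
  intro p hp
  rcases (PySem.List.mem_enumerate_iff arr 0 p).1 hp with ⟨k, hklt, rfl⟩
  simp [hklt]

theorem mem_enum_nonneg (arr : List String) :
    ∀ p ∈ PySem.List.enumerate arr 0, (0 : Int) ≤ p.1 := by
  intro p hp
  rcases (PySem.List.mem_enumerate_iff arr 0 p).1 hp with ⟨k, _, rfl⟩
  simp

-- ===== VERDICT (by name: the statement is the Claim_ definition above) =====
theorem solution_spec : Claim_equal_solution := by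
  intro arr searchWord _hdom hpre
  unfold Spec_solution solution solution_alt
  simp only
  rcases hpre with ⟨w, hw, hwk⟩
  rcases List.mem_iff_getElem.1 hw with ⟨i, hi, hieq⟩
  have hex : ∃ p ∈ PySem.List.enumerate arr 0,
      getKey (PySem.Str.lower p.2) = getKey searchWord := by
    refine ⟨((i : Int), w), ?_, hwk⟩
    exact (PySem.List.mem_enumerate_iff arr 0 _).2 ⟨i, hi, by simp [hieq]⟩
  rw [bucket_eq, PySem.Dict.getD_empty, List.nil_append,
    loopA_filter_eq_scanF arr searchWord (getKey searchWord) _ (mem_enum_get arr),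
    PySem.Dict.getD_eq_get?_getD, foldB_get?, PySem.Dict.get?_empty,
    gOpt_none _ _ _ (mem_enum_nonneg arr) hex]
  rfl
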